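-- pv_equiv track=rewrite | github.com/2025K-PaaS/Backend | services/request_service.py | _filter_requests
-- ===== SOURCE A (Python) =====
-- from typing import Iterable, List, Dict, Any, Tuple, Optional
--
-- def _filter_requests(rows: List[Dict[str, Any]],
--                      material_type: Optional[str],
--                      wanted_item: Optional[str],
--                      username: Optional[str]) -> List[Dict[str, Any]]:
--     def _ok(r: Dict[str, Any]) -> bool:
--         if username and r.get("username") != username:
--             return False
--         if material_type and r.get("material_type") != material_type:
--             return False
--         if wanted_item:
--             wi = (r.get("item_name") or "")
--             if wanted_item.lower() not in wi.lower():
--                 return False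
--         return True
--     return [r for r in rows if _ok(r)]
-- ===== SOURCE B (Python) =====
-- from typing import List, Dict, Any, Optional
--
-- def _filter_requests(rows: List[Dict[str, Any]],
--                      material_type: Optional[str],
--                      wanted_item: Optional[str],
--                      username: Optional[str]) -> List[Dict[str, Any]]:
--     result = rows
--     if username:
--         result = [r for r in result if r.get("username") == username]
--     if material_type:
--         result = [r for r in result if r.get("material_type") == material_type]
--     if wanted_item:
--         w = wanted_item.lower()
--         result = [r for r in result if w in (r.get("item_name") or "").lower()]
--     return result
-- ===== Notes on version B (the rewrite author's own statement) =====
-- stated objective: simpler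
-- what changed: Replaced the single pass with a nested combined predicate by up to three independent sequential narrowing passes, one per active filter parameter, each a plain comprehension over the previous result.
import Mathlib
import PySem

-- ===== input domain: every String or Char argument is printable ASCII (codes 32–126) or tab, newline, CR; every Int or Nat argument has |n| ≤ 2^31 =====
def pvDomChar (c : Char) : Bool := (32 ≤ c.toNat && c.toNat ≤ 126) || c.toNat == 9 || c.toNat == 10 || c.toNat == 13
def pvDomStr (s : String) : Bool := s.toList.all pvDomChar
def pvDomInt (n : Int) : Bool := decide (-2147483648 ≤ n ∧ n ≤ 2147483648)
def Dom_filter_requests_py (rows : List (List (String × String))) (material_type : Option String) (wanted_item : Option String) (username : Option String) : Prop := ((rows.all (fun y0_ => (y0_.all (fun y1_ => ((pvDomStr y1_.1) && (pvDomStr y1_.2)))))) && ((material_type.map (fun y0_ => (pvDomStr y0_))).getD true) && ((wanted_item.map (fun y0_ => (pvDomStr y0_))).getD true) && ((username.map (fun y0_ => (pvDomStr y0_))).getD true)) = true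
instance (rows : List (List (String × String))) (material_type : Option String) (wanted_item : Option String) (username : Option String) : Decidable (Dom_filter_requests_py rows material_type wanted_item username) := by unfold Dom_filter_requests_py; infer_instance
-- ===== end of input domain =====

-- B replaces the combined-predicate single pass by sequential narrowing filter passes, one per active parameter (objective: simpler decomposition).


-- ===== PORT A =====
def pvOkA (material_type : Option String) (wanted_item : Option String) (username : Option String) (r : List (String × String)) : Bool :=
  if (match username with
      | some u => u != "" && (PySem.Dict.mk r).get? "username" != some u
      | none => false) then false
  else if (match material_type with
      | some m => m != "" && (PySem.Dict.mk r).get? "material_type" != some m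
      | none => false) then false
  else match wanted_item with
    | some w =>
      if w != "" then
        let wi := ((PySem.Dict.mk r).get? "item_name").getD ""
        PySem.Str.isIn (PySem.Str.lower w) (PySem.Str.lower wi)
      else true
    | none => true

def filter_requests_py (rows : List (List (String × String))) (material_type : Option String) (wanted_item : Option String) (username : Option String) : List (List (String × String)) :=
  rows.filter (pvOkA material_type wanted_item username)

-- ===== PORT B =====
def filter_requests_py_alt (rows : List (List (String × String))) (material_type : Option String) (wanted_item : Option String) (username : Option String) : List (List (String × String)) :=
  let r1 := match username with
    | some u => if u != "" then rows.filter (fun r => (PySem.Dict.mk r).get? "username" == some u) else rows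
    | none => rows
  let r2 := match material_type with
    | some m => if m != "" then r1.filter (fun r => (PySem.Dict.mk r).get? "material_type" == some m) else r1
    | none => r1
  let r3 := match wanted_item with
    | some w =>
      if w != "" then
        let wl := PySem.Str.lower w
        r2.filter (fun r => PySem.Str.isIn wl (PySem.Str.lower (((PySem.Dict.mk r).get? "item_name").getD "")))
      else r2
    | none => r2
  r3

-- ===== PRECONDITION & SPEC =====
def Spec_filter_requests_py (rows : List (List (String × String))) (material_type : Option String) (wanted_item : Option String) (username : Option String) (out : List (List (String × String))) : Prop := out = filter_requests_py_alt rows material_type wanted_item username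
instance (rows : List (List (String × String))) (material_type : Option String) (wanted_item : Option String) (username : Option String) (out : List (List (String × String))) : Decidable (Spec_filter_requests_py rows material_type wanted_item username out) := by unfold Spec_filter_requests_py; infer_instance

-- ===== CLAIM (what is proved, stated in full; the proofs are below) =====
def Claim_equal_filter_requests_py : Prop := ∀ (rows : List (List (String × String))) (material_type : Option String) (wanted_item : Option String) (username : Option String), Dom_filter_requests_py rows material_type wanted_item username → Spec_filter_requests_py rows material_type wanted_item username (filter_requests_py rows material_type wanted_item username)

-- ===== LEMMAS AND PROOFS =====

-- ===== VERDICT (by name: the statement is the Claim_ definition above) =====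
theorem filter_requests_py_spec : Claim_equal_filter_requests_py := by
  intro rows mt wi un _
  unfold Spec_filter_requests_py filter_requests_py filter_requests_py_alt
  cases un <;> cases mt <;> cases wi <;> simp only [] <;> (try split_ifs) <;>
    (try simp only [List.filter_filter]) <;>
    first
    | (apply List.filter_congr; intro r _;
       simp [pvOkA, *, Bool.beq_eq_decide_eq, Bool.and_comm, Bool.and_assoc])
    | (rw [List.filter_eq_self]; intro r _; simp [pvOkA, *])
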